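-- pv_equiv track=rewrite | github.com/Muzaraigne/adventurecode | 2017/jour11/sol.py | maxpas
-- ===== SOURCE A (Python) =====
-- dir = {
--         "ne":(+1,+1),
--         "sw" : (-1,-1),
--         "se":(+1,0),
--         "nw":(-1,0),
--         "n":(0,1),
--         "s":(0,-1)
-- }
--
-- def maxpas(data):
--     m = 0
--     pos= (0,0)
--     for d in data :
--         p = dir[d]
--         pos = (pos[0]+p[0],pos[1]+p[1])
--         m = max(m,max(abs(pos[0]),abs(pos[1])))
--     return m
-- ===== SOURCE B (Python) =====
-- dir = {
--         "ne":(+1,+1),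
--         "sw" : (-1,-1),
--         "se":(+1,0),
--         "nw":(-1,0),
--         "n":(0,1),
--         "s":(0,-1)
-- }
--
-- def maxpas(data):
--     # coordinate-wise decomposition: the max Chebyshev distance reached equals the
--     # max, over the two axes, of the largest |prefix sum| of that axis's deltas.
--     dxs = [dir[d][0] for d in data]
--     dys = [dir[d][1] for d in data]
--
--     def farthest(deltas):
--         # largest absolute value of a prefix sum, via running max/min (no abs)
--         hi = lo = s = 0
--         for v in deltas:
--             s += v
--             hi = max(hi, s)
--             lo = min(lo, s)
--         return max(hi, -lo)
--
--     return max(farthest(dxs), farthest(dys))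
-- ===== Notes on version B (the rewrite author's own statement) =====
-- stated objective: alternative
-- what changed: A's single fused loop over 2-D positions tracking a running Chebyshev max is replaced by a coordinate-wise decomposition: each axis's deltas are reduced independently by a running max/min of prefix sums (no abs), and the answer is the max of the two axes; correct because max over steps of max(|x|,|y|) equals max(max|x|, max|y|).
import Mathlib
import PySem

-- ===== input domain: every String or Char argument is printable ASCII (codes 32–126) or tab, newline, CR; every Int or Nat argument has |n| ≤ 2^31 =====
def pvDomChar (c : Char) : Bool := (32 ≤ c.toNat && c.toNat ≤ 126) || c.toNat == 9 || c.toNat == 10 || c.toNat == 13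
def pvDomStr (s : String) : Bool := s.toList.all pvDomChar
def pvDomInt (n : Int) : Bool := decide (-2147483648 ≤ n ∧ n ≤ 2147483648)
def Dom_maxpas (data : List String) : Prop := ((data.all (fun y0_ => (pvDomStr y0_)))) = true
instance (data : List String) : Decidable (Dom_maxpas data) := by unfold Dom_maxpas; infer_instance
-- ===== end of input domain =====

-- B decomposes coordinate-wise: each axis is reduced independently by a running max/min of
-- prefix sums, instead of A's fused 2-D loop tracking a running Chebyshev max with abs.
-- ===== PORT A =====
-- the module-level dict 'dir'; lookup returns none where Python raises KeyError
def dirGet (d : String) : Option (Int × Int) :=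
  if d = "ne" then some (1, 1)
  else if d = "sw" then some (-1, -1)
  else if d = "se" then some (1, 0)
  else if d = "nw" then some (-1, 0)
  else if d = "n" then some (0, 1)
  else if d = "s" then some (0, -1)
  else none

-- A's loop: state (m, pos); none signals the KeyError (excluded by Pre_)
def maxpasLoop : List String → Int → Int × Int → Option Int
  | [], m, _ => some m
  | d :: rest, m, pos =>
    match dirGet d with
    | none => none
    | some p =>
      let pos' := (pos.1 + p.1, pos.2 + p.2)
      maxpasLoop rest (max m (max |pos'.1| |pos'.2|)) pos'

def maxpas (data : List String) : Int := (maxpasLoop data 0 (0, 0)).getD 0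

-- ===== PORT B =====
-- B's helper 'farthest': largest |prefix sum| via running max/min, no abs
def farthest : List Int → Int → Int → Int → Int
  | [], hi, lo, _ => max hi (-lo)
  | v :: rest, hi, lo, s =>
    let s' := s + v
    farthest rest (max hi s') (min lo s') s'

def maxpas_alt (data : List String) : Int :=
  match data.mapM (fun d => (dirGet d).map Prod.fst),
        data.mapM (fun d => (dirGet d).map Prod.snd) with
  | some dxs, some dys => max (farthest dxs 0 0 0) (farthest dys 0 0 0)
  | _, _ => 0   -- KeyError in a comprehension (excluded by Pre_)

-- ===== PRECONDITION & SPEC =====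
-- Pre_ excludes exactly the inputs containing a step outside the dict keys, on which A raises KeyError.
def Pre_maxpas (data : List String) : Prop :=
  ∀ d ∈ data, d ∈ ["ne", "sw", "se", "nw", "n", "s"]
instance (data : List String) : Decidable (Pre_maxpas data) := by unfold Pre_maxpas; infer_instance
def pvWitness_maxpas : List String := ["ne", "n", "sw", "s", "se", "nw"]
def Spec_maxpas (data : List String) (out : Int) : Prop := out = maxpas_alt data
instance (data : List String) (out : Int) : Decidable (Spec_maxpas data out) := by unfold Spec_maxpas; infer_instance

-- ===== CLAIM (what is proved, stated in full; the proofs are below) =====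
def Claim_equal_maxpas : Prop := ∀ (data : List String), Dom_maxpas data → Pre_maxpas data → Spec_maxpas data (maxpas data)

-- ===== LEMMAS AND PROOFS =====
lemma dirGet_isSome {d : String} (h : d ∈ ["ne", "sw", "se", "nw", "n", "s"]) :
    (dirGet d).isSome := by
  simp only [List.mem_cons, List.not_mem_nil, or_false] at h
  rcases h with h | h | h | h | h | h <;> subst h <;> decide

-- A's fused loop equals the coordinate-wise pair of farthest-scans, under the max/min invariant
lemma maxpasLoop_eq (data : List String) :
    ∀ (x y hx lx hy ly : Int), Pre_maxpas data →
    maxpasLoop data (max (max hx (-lx)) (max hy (-ly))) (x, y) =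
      some (max
        (farthest ((data.map (fun d => (dirGet d).getD (0,0))).map Prod.fst) hx lx x)
        (farthest ((data.map (fun d => (dirGet d).getD (0,0))).map Prod.snd) hy ly y)) := by
  induction data with
  | nil => intro x y hx lx hy ly _; simp [maxpasLoop, farthest]
  | cons d rest ih =>
    intro x y hx lx hy ly h
    obtain ⟨p, hp⟩ := Option.isSome_iff_exists.mp (dirGet_isSome (h d (by simp)))
    have hrest : Pre_maxpas rest := fun e he => h e (List.mem_cons_of_mem _ he)
    have key : max (max (max hx (-lx)) (max hy (-ly))) (max |x + p.1| |y + p.2|) =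
        max (max (max hx (x + p.1)) (-(min lx (x + p.1))))
            (max (max hy (y + p.2)) (-(min ly (y + p.2)))) := by
      have ax : ∀ h l v : Int, max (max h (-l)) (max v (-v)) = max (max h v) (-(min l v)) := by
        intro h l v; omega
      rw [abs_eq_max_neg, abs_eq_max_neg, max_max_max_comm, ax, ax]
    simp only [maxpasLoop, hp, List.map_cons, farthest, Option.getD_some]
    rw [key]
    exact ih (x + p.1) (y + p.2) (max hx (x + p.1)) (min lx (x + p.1))
      (max hy (y + p.2)) (min ly (y + p.2)) hrest

lemma mapM_proj (data : List String) (h : Pre_maxpas data) (f : Int × Int → Int) :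
    data.mapM (fun d => (dirGet d).map f) =
      some ((data.map (fun d => (dirGet d).getD (0,0))).map f) := by
  induction data with
  | nil => simp
  | cons d rest ih =>
    obtain ⟨p, hp⟩ := Option.isSome_iff_exists.mp (dirGet_isSome (h d (by simp)))
    simp [List.mapM_cons, hp, ih (fun e he => h e (List.mem_cons_of_mem _ he))]

-- ===== VERDICT (by name: the statement is the Claim_ definition above) =====
theorem maxpas_spec : Claim_equal_maxpas := by
  intro data _ hpre
  unfold Spec_maxpas maxpas maxpas_alt
  rw [mapM_proj data hpre Prod.fst, mapM_proj data hpre Prod.snd]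
  have := maxpasLoop_eq data 0 0 0 0 0 0 hpre
  simp only [show (max (max (0:Int) (-0)) (max 0 (-0))) = 0 by norm_num] at this
  simp [this]
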